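-- pv_equiv track=rewrite | github.com/DeanLuus22021994/Aspire-Full | Aspire-Full.Python/tools/lint/run.py | _partition_args
-- ===== SOURCE A (Python) =====
-- from typing import Any, Iterable, Tuple
--
-- def _partition_args(args: Iterable[str]) -> Tuple[list[str], list[str], bool]:
--     """Partition arguments into options and targets."""
--     options: list[str] = []
--     targets: list[str] = []
--     after_double_dash = False
--     for arg in args:
--         if after_double_dash:
--             targets.append(arg)
--             continue
--         if arg == "--":
--             after_double_dash = True
--             continue
--         if arg.startswith("-") and arg != "-":
--             options.append(arg)
--         else:
--             targets.append(arg)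
--     return options, targets, after_double_dash
-- ===== SOURCE B (Python) =====
-- def _partition_args(args):
--     lst = list(args)
--     if "--" in lst:
--         i = lst.index("--")
--         prefix, suffix, after_double_dash = lst[:i], lst[i + 1:], True
--     else:
--         prefix, suffix, after_double_dash = lst, [], False
--     options = [a for a in prefix if a.startswith("-") and a != "-"]
--     targets = [a for a in prefix if not (a.startswith("-") and a != "-")] + suffix
--     return options, targets, after_double_dash
-- ===== Notes on version B (the rewrite author's own statement) =====
-- stated objective: alternative
-- what changed: B replaces A's single stateful loop (a running after-'--' flag with per-element branching) by a split-then-filter decomposition: locate the first '--' once, slice the list into prefix and suffix, and build options/targets by two filters over the prefix plus the suffix appended.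
import Mathlib
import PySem

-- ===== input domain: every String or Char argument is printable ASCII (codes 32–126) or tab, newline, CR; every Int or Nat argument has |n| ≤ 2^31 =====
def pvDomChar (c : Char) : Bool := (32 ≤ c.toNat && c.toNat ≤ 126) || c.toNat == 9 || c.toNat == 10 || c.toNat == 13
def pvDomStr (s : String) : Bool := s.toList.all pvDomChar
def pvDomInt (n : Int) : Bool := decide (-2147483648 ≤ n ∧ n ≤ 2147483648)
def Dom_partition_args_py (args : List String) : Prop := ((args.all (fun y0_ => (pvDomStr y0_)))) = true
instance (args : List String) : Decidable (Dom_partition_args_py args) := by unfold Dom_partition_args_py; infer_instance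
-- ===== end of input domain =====

-- B replaces A's stateful flag-loop by split-at-first-'--' then two filters (alternative decomposition, same cost).


-- ===== PORT A =====
def pvLoopA : List String → List String → List String → Bool → List String × List String × Bool
  | [], options, targets, flag => (options, targets, flag)
  | arg :: rest, options, targets, flag =>
    if flag then pvLoopA rest options (targets ++ [arg]) flag
    else if arg == "--" then pvLoopA rest options targets true
    else if PySem.Str.startswith arg "-" && arg != "-" then
      pvLoopA rest (options ++ [arg]) targets flag
    else pvLoopA rest options (targets ++ [arg]) flag

def partition_args_py (args : List String) : List String × List String × Bool :=
  pvLoopA args [] [] false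

-- ===== PORT B =====
def pvIsOpt (a : String) : Bool := PySem.Str.startswith a "-" && a != "-"

def partition_args_py_alt (args : List String) : List String × List String × Bool :=
  let psf : List String × List String × Bool :=
    if "--" ∈ args then
      match PySem.List.index? args "--" with
      | some i => (PySem.List.slice args none (some (i : Int)),
                   PySem.List.slice args (some ((i : Int) + 1)) none, true)
      | none => (args, [], false)
    else (args, [], false)
  (psf.1.filter pvIsOpt,
   psf.1.filter (fun a => !(pvIsOpt a)) ++ psf.2.1,
   psf.2.2)

-- ===== PRECONDITION & SPEC =====
def Spec_partition_args_py (args : List String) (out : List String × List String × Bool) : Prop := out = partition_args_py_alt args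
instance (args : List String) (out : List String × List String × Bool) : Decidable (Spec_partition_args_py args out) := by unfold Spec_partition_args_py; infer_instance

-- ===== CLAIM (what is proved, stated in full; the proofs are below) =====
def Claim_equal_partition_args_py : Prop := ∀ (args : List String), Dom_partition_args_py args → Spec_partition_args_py args (partition_args_py args)

-- ===== LEMMAS AND PROOFS =====
theorem pvAlt_nil : partition_args_py_alt [] = ([], [], false) := by
  simp [partition_args_py_alt]

theorem pvAlt_dd (rest : List String) :
    partition_args_py_alt ("--" :: rest) = ([], rest, true) := by
  unfold partition_args_py_alt
  rw [if_pos (List.mem_cons_self), PySem.List.index?_cons_self]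
  have h1 : PySem.List.slice ("--" :: rest) none (some ((0 : Nat) : Int)) = [] := by
    rw [PySem.List.slice_to_natCast]; simp
  have h2 : PySem.List.slice ("--" :: rest) (some (((0 : Nat) : Int) + 1)) none = rest := by
    rw [show (((0 : Nat) : Int) + 1) = ((1 : Nat) : Int) by norm_num,
      PySem.List.slice_from_natCast]
    simp
  simp only [h1, h2, List.filter_nil, List.nil_append]

theorem pvAlt_cons (a : String) (rest : List String) (h : a ≠ "--") :
    partition_args_py_alt (a :: rest) =
      (if pvIsOpt a then a :: (partition_args_py_alt rest).1 else (partition_args_py_alt rest).1,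
       if pvIsOpt a then (partition_args_py_alt rest).2.1 else a :: (partition_args_py_alt rest).2.1,
       (partition_args_py_alt rest).2.2) := by
  by_cases hmem : "--" ∈ rest
  · obtain ⟨i, hi⟩ := Option.isSome_iff_exists.mp
      ((PySem.List.index?_isSome_iff rest "--").mpr hmem)
    have hmem' : "--" ∈ a :: rest := List.mem_cons_of_mem _ hmem
    unfold partition_args_py_alt
    rw [if_pos hmem', if_pos hmem, PySem.List.index?_cons_of_ne rest h, hi, Option.map_some]
    have h1 : PySem.List.slice (a :: rest) none (some ((i + 1 : Nat) : Int))
        = a :: PySem.List.slice rest none (some (i : Int)) := by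
      rw [PySem.List.slice_to_natCast, PySem.List.slice_to_natCast]
      simp [List.take_succ_cons]
    have h2 : PySem.List.slice (a :: rest) (some (((i + 1 : Nat) : Int) + 1)) none
        = PySem.List.slice rest (some (((i : Nat) : Int) + 1)) none := by
      rw [show (((i + 1 : Nat) : Int) + 1) = ((i + 2 : Nat) : Int) by push_cast; ring,
        show (((i : Nat) : Int) + 1) = ((i + 1 : Nat) : Int) by push_cast; ring,
        PySem.List.slice_from_natCast, PySem.List.slice_from_natCast]
      simp
    simp only [h1, h2, List.filter_cons]
    by_cases hopt : pvIsOpt a = true <;> simp [hopt]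
  · have hmem' : "--" ∉ a :: rest := by
      intro hx; rcases List.mem_cons.mp hx with hx | hx
      · exact h hx.symm
      · exact hmem hx
    unfold partition_args_py_alt
    rw [if_neg hmem', if_neg hmem]
    simp only [List.filter_cons]
    by_cases hopt : pvIsOpt a = true <;> simp [hopt]

theorem pvLoopA_true (args opts tgts : List String) :
    pvLoopA args opts tgts true = (opts, tgts ++ args, true) := by
  induction args generalizing tgts with
  | nil => simp [pvLoopA]
  | cons a rest ih => simp [pvLoopA, ih]

theorem pvLoopA_false (args opts tgts : List String) :
    pvLoopA args opts tgts false =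
      (opts ++ (partition_args_py_alt args).1,
       tgts ++ (partition_args_py_alt args).2.1,
       (partition_args_py_alt args).2.2) := by
  induction args generalizing opts tgts with
  | nil => simp [pvLoopA, pvAlt_nil]
  | cons a rest ih =>
    by_cases hdd : a = "--"
    · subst hdd
      simp [pvLoopA, pvLoopA_true, pvAlt_dd]
    · have hne : (a == "--") = false := by simp [hdd]
      rw [pvAlt_cons a rest hdd]
      by_cases hopt : pvIsOpt a = true
      all_goals
        simp only [pvLoopA, Bool.false_eq_true, if_false, hne,
          show (PySem.Str.startswith a "-" && a != "-") = pvIsOpt a from rfl]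
      · simp [hopt, ih]
      · simp only [Bool.not_eq_true] at hopt
        simp [hopt, ih]

-- ===== VERDICT (by name: the statement is the Claim_ definition above) =====
theorem partition_args_py_spec : Claim_equal_partition_args_py := by
  intro args _
  unfold Spec_partition_args_py partition_args_py
  rw [pvLoopA_false]
  simp
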